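-- pv_equiv track=rewrite | github.com/lukelc23/Nelli-Reimplementation | modified_train_networks_with_symbolic_distance.py | get_all_pairs_by_distance
-- ===== SOURCE A (Python) =====
-- from collections import defaultdict
--
-- def get_symbolic_distance(i, j):
--     """Calculate symbolic distance between pair (i, j)"""
--     return abs(j - i)
--
-- def get_all_pairs_by_distance(items_n):
--     """Get all valid pairs organized by symbolic distance"""
--     pairs_by_distance = defaultdict(list)
--
--     for i in range(items_n):
--         for j in range(items_n):
--             if i != j:  # Exclude diagonal pairs
--                 distance = get_symbolic_distance(i, j)
--                 if items_n - distance > 0: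
--                     pairs_by_distance[distance].append((i, j))
--
--     return pairs_by_distance
-- ===== SOURCE B (Python) =====
-- from collections import defaultdict
--
-- def get_all_pairs_by_distance(items_n):
--     """Get all valid pairs organized by symbolic distance"""
--     pairs_by_distance = defaultdict(list)
--     for distance in range(1, items_n):
--         bucket = []
--         for i in range(items_n):
--             if i - distance >= 0:
--                 bucket.append((i, i - distance))
--             if i + distance < items_n:
--                 bucket.append((i, i + distance))
--         pairs_by_distance[distance] = bucket
--     return pairs_by_distance
-- ===== Notes on version B (the rewrite author's own statement) =====
-- stated objective: alternative
-- what changed: B loops over each distance d as the outer loop and generates its bucket directly as (i,i-d) then (i,i+d), instead of A's scan of all n^2 (i,j) pairs bucketing each by a computed abs distance through per-pair defaultdict lookups.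
import Mathlib
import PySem

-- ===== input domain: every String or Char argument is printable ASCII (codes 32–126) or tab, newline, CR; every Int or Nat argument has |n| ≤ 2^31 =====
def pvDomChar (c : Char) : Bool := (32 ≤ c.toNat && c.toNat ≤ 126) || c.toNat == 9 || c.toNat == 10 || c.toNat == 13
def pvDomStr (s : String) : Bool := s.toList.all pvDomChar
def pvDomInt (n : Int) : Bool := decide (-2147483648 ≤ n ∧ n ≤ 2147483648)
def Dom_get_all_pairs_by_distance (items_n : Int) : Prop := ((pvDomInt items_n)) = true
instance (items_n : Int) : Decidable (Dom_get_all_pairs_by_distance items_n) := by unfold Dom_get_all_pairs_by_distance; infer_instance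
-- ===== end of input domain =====

-- B builds each distance bucket directly (outer loop over distance, pairs (i,i-d) then (i,i+d)) instead of
-- scanning all (i,j) pairs and bucketing each by its computed abs distance (objective: alternative algorithm).

-- ===== PORT A =====
def get_symbolic_distance (i j : Int) : Int := |j - i|

def get_all_pairs_by_distance (items_n : Int) : List (Int × List (Int × Int)) :=
  ((PySem.List.pyRange 0 items_n 1).foldl (fun d i =>
      (PySem.List.pyRange 0 items_n 1).foldl (fun d j =>
        if i ≠ j then
          let distance := get_symbolic_distance i j
          if items_n - distance > 0 then
            d.modify distance [] (fun l => l ++ [(i, j)])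
          else d
        else d) d)
    (PySem.Dict.empty : PySem.Dict Int (List (Int × Int)))).items

-- ===== PORT B =====
def get_all_pairs_by_distance_alt (items_n : Int) : List (Int × List (Int × Int)) :=
  ((PySem.List.pyRange 1 items_n 1).foldl (fun d distance =>
      d.insert distance
        ((PySem.List.pyRange 0 items_n 1).foldl (fun bucket i =>
          let bucket := if i - distance ≥ 0 then bucket ++ [(i, i - distance)] else bucket
          if i + distance < items_n then bucket ++ [(i, i + distance)] else bucket) []))
    (PySem.Dict.empty : PySem.Dict Int (List (Int × Int)))).items

-- ===== PRECONDITION & SPEC =====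
def Spec_get_all_pairs_by_distance (items_n : Int) (out : List (Int × List (Int × Int))) : Prop := out = get_all_pairs_by_distance_alt items_n
instance (items_n : Int) (out : List (Int × List (Int × Int))) : Decidable (Spec_get_all_pairs_by_distance items_n out) := by unfold Spec_get_all_pairs_by_distance; infer_instance

-- ===== CLAIM (what is proved, stated in full; the proofs are below) =====
def Claim_equal_get_all_pairs_by_distance : Prop := ∀ (items_n : Int), Dom_get_all_pairs_by_distance items_n → Spec_get_all_pairs_by_distance items_n (get_all_pairs_by_distance items_n)

-- ===== LEMMAS AND PROOFS =====

-- A's per-(i,j) action seen as an optional (key, value) emission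
def pvRowFn (n i : Int) : Int → Option (Int × (Int × Int)) :=
  fun j => if i ≠ j ∧ 0 < n - |j - i| then some (|j - i|, (i, j)) else none

-- the flattened stream of (distance, pair) items A pushes into its dict, in order
def pvF (n : Int) : List (Int × (Int × Int)) :=
  (PySem.List.pyRange 0 n 1).flatMap (fun i => (PySem.List.pyRange 0 n 1).filterMap (pvRowFn n i))

def pvStep (d : PySem.Dict Int (List (Int × Int))) (q : Int × (Int × Int)) : PySem.Dict Int (List (Int × Int)) :=
  d.modify q.1 [] (fun l => l ++ [q.2])

lemma pvFoldl_filterMap {α β γ : Type} (g : α → Option β) (f : γ → β → γ) (xs : List α) (init : γ) :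
    xs.foldl (fun acc x => match g x with | some q => f acc q | none => acc) init
      = (xs.filterMap g).foldl f init := by
  induction xs generalizing init with
  | nil => rfl
  | cons x xs ih => cases h : g x <;> simp [h, ih]

lemma pvInnerA (n i : Int) (d0 : PySem.Dict Int (List (Int × Int))) :
    (PySem.List.pyRange 0 n 1).foldl (fun d j =>
        if i ≠ j then
          let distance := get_symbolic_distance i j
          if n - distance > 0 then d.modify distance [] (fun l => l ++ [(i, j)]) else d
        else d) d0
      = ((PySem.List.pyRange 0 n 1).filterMap (pvRowFn n i)).foldl pvStep d0 := by
  rw [← pvFoldl_filterMap]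
  congr 1
  funext d j
  simp only [pvRowFn, get_symbolic_distance, pvStep, gt_iff_lt, sub_pos]
  by_cases h1 : i = j
  · simp [h1]
  · by_cases h2 : |j - i| < n
    · rw [if_pos h1, if_pos h2, if_pos ⟨h1, h2⟩]
    · rw [if_pos h1, if_neg h2, if_neg (fun hc => h2 hc.2)]

lemma pvA_eq (n : Int) :
    get_all_pairs_by_distance n = ((pvF n).foldl pvStep PySem.Dict.empty).items := by
  unfold get_all_pairs_by_distance pvF
  rw [List.foldl_flatMap]
  refine congrArg PySem.Dict.items
    (congrArg (fun f => List.foldl f PySem.Dict.empty (PySem.List.pyRange 0 n 1)) ?_)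
  funext d i
  exact pvInnerA n i d

lemma pvKeysNodup (n : Int) : ((pvF n).foldl pvStep PySem.Dict.empty).keys.Nodup := by
  unfold pvStep
  exact PySem.Dict.nodup_keys_foldl_modify_key _ _ _ _ _ (by simp)

lemma pvKeys (n : Int) :
    ((pvF n).foldl pvStep PySem.Dict.empty).keys = PySem.Set.ofList ((pvF n).map (·.1)) := by
  unfold pvStep
  rw [PySem.Dict.keys_foldl_modify_key]
  rw [show (PySem.Dict.empty : PySem.Dict Int (List (Int × Int))).keys = [] from rfl]
  exact PySem.Set.update_nil_left _

lemma pvGetD (n c : Int) :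
    ((pvF n).foldl pvStep PySem.Dict.empty).getD c []
      = ((pvF n).filter (fun p => p.1 == c)).map (·.2) := by
  unfold pvStep
  rw [PySem.Dict.getD_foldl_modify_append]
  simp

lemma pvA_items (n : Int) :
    get_all_pairs_by_distance n
      = (PySem.Set.ofList ((pvF n).map (·.1))).map
          (fun k => (k, ((pvF n).filter (fun p => p.1 == k)).map (·.2))) := by
  rw [pvA_eq, PySem.Dict.items_eq_map_keys _ (pvKeysNodup n) [], pvKeys]
  exact List.map_congr_left fun k _ => by rw [pvGetD]

lemma pvKeysList (n : Int) :
    PySem.Set.ofList ((pvF n).map (·.1)) = PySem.List.pyRange 1 n 1 := by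
  rcases (by omega : n ≤ 0 ∨ 0 < n) with hn | hn
  · rw [pvF, PySem.List.pyRange_one_eq_nil (by omega : n ≤ (0:Int)),
        PySem.List.pyRange_one_eq_nil (by omega : n ≤ (1:Int))]
    rfl
  · have hsplit : PySem.List.pyRange 0 n 1 = 0 :: PySem.List.pyRange 1 n 1 := by
      rw [PySem.List.pyRange_one_cons hn]; norm_num
    have hrow0 : (PySem.List.pyRange 0 n 1).filterMap (pvRowFn n 0)
        = (PySem.List.pyRange 1 n 1).map (fun j => (j, ((0:Int), j))) := by
      rw [hsplit, List.filterMap_cons]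
      have h0 : pvRowFn n 0 0 = none := by simp [pvRowFn]
      rw [h0]
      rw [List.filterMap_congr (g := fun j => some (j, ((0:Int), j)))]
      · exact List.filterMap_eq_map_iff_forall_eq_some.mpr fun x _ => rfl
      · intro j hj
        rw [PySem.List.mem_pyRange_one] at hj
        have habs : |j - (0:Int)| = j := by rw [sub_zero, abs_of_nonneg (by omega)]
        simp only [pvRowFn, habs]
        rw [if_pos ⟨by omega, by omega⟩]
    have hFsplit : pvF n
        = ((PySem.List.pyRange 0 n 1).filterMap (pvRowFn n 0))
          ++ (PySem.List.pyRange 1 n 1).flatMap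
              (fun i => (PySem.List.pyRange 0 n 1).filterMap (pvRowFn n i)) := by
      unfold pvF
      conv_lhs => rw [hsplit]
      rw [List.flatMap_cons, ← hsplit]
    rw [hFsplit, List.map_append, hrow0, List.map_map]
    have hfst : ((fun (p : Int × (Int × Int)) => p.1) ∘ fun j => (j, ((0:Int), j)))
        = fun j => j := funext fun j => rfl
    rw [hfst, List.map_id']
    rw [PySem.Set.ofList_append,
        PySem.Set.ofList_eq_self_of_nodup _ (PySem.List.nodup_pyRange_one 1 n),
        PySem.Set.update_eq_append_filter]
    have hnil : ((PySem.Set.ofList ((((PySem.List.pyRange 1 n 1).flatMap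
          (fun i => (PySem.List.pyRange 0 n 1).filterMap (pvRowFn n i))).map (·.1)))).filter
            (fun y => !(PySem.Set.contains (PySem.List.pyRange 1 n 1) y))) = [] := by
      rw [List.filter_eq_nil_iff]
      intro y hy
      rw [PySem.Set.mem_ofList, List.mem_map] at hy
      obtain ⟨p, hpmem, hp1⟩ := hy
      rw [List.mem_flatMap] at hpmem
      obtain ⟨i, hi, hpf⟩ := hpmem
      rw [List.mem_filterMap] at hpf
      obtain ⟨j, hj, hop⟩ := hpf
      rw [PySem.List.mem_pyRange_one] at hi hj
      simp only [pvRowFn] at hop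
      split_ifs at hop with hg
      obtain ⟨hij, hbound⟩ := hg
      have heq := Option.some.inj hop
      subst heq
      rw [Int.abs_eq_natAbs] at hbound
      have hy' : y = |j - i| := hp1.symm
      subst hy'
      have hmem : |j - i| ∈ PySem.List.pyRange 1 n 1 := by
        rw [PySem.List.mem_pyRange_one, Int.abs_eq_natAbs]
        omega
      simp [PySem.Set.contains_eq_listContains, hmem]
    rw [hnil, List.append_nil]

-- the bucket a single distance d collects from A's row i, in closed form
lemma pvRowA (n i d : Int) (hd : 0 < d) (hdn : d < n) :
    ∀ (k : Nat) (a : Int), (n - a).toNat = k →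
    (((PySem.List.pyRange a n 1).filterMap (pvRowFn n i)).filter (fun p => p.1 == d)).map (·.2)
      = (if a ≤ i - d ∧ i - d < n then [(i, i - d)] else [])
        ++ (if a ≤ i + d ∧ i + d < n then [(i, i + d)] else []) := by
  intro k
  induction k with
  | zero =>
    intro a ha
    rw [PySem.List.pyRange_one_eq_nil (by omega : n ≤ a)]
    simp only [List.filterMap_nil, List.filter_nil, List.map_nil]
    rw [if_neg (by omega), if_neg (by omega)]
    rfl
  | succ k ih =>
    intro a ha
    have hlt : a < n := by omega
    rw [PySem.List.pyRange_one_cons hlt, List.filterMap_cons]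
    by_cases h1 : a = i - d
    · have hr : pvRowFn n i a = some (d, (i, a)) := by
        simp only [pvRowFn, show a - i = -d from by omega, abs_neg, abs_of_pos hd]
        rw [if_pos ⟨by omega, by omega⟩]
      rw [hr, List.filter_cons_of_pos (by simp), List.map_cons, ih (a + 1) (by omega)]
      by_cases h2 : i + d < n
      · rw [if_neg (by omega), if_pos ⟨by omega, h2⟩, if_pos ⟨by omega, by omega⟩,
            if_pos ⟨by omega, h2⟩]
        simp [h1]
      · rw [if_neg (by omega), if_neg (by omega), if_pos ⟨by omega, by omega⟩,
            if_neg (by omega)]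
        simp [h1]
    · by_cases h2 : a = i + d
      · have hr : pvRowFn n i a = some (d, (i, a)) := by
          simp only [pvRowFn, show a - i = d from by omega, abs_of_pos hd]
          rw [if_pos ⟨by omega, by omega⟩]
        rw [hr, List.filter_cons_of_pos (by simp), List.map_cons, ih (a + 1) (by omega)]
        rw [if_neg (by omega), if_neg (by omega), if_neg (by omega),
            if_pos ⟨by omega, by omega⟩]
        simp [h2]
      · have hne : |a - i| ≠ d := by rw [Int.abs_eq_natAbs]; omega
        by_cases hg : i ≠ a ∧ 0 < n - |a - i|
        · have hr : pvRowFn n i a = some (|a - i|, (i, a)) := by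
            simp only [pvRowFn]; rw [if_pos hg]
          rw [hr, List.filter_cons_of_neg (by simpa using hne), ih (a + 1) (by omega)]
          congr 1
          · by_cases hc : a + 1 ≤ i - d ∧ i - d < n
            · rw [if_pos hc, if_pos ⟨by omega, hc.2⟩]
            · rw [if_neg hc, if_neg (by omega)]
          · by_cases hc : a + 1 ≤ i + d ∧ i + d < n
            · rw [if_pos hc, if_pos ⟨by omega, hc.2⟩]
            · rw [if_neg hc, if_neg (by omega)]
        · have hr : pvRowFn n i a = none := by simp only [pvRowFn]; rw [if_neg hg]
          rw [hr, ih (a + 1) (by omega)]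
          congr 1
          · by_cases hc : a + 1 ≤ i - d ∧ i - d < n
            · rw [if_pos hc, if_pos ⟨by omega, hc.2⟩]
            · rw [if_neg hc, if_neg (by omega)]
          · by_cases hc : a + 1 ≤ i + d ∧ i + d < n
            · rw [if_pos hc, if_pos ⟨by omega, hc.2⟩]
            · rw [if_neg hc, if_neg (by omega)]

lemma pvB_eq (n : Int) :
    get_all_pairs_by_distance_alt n
      = (PySem.List.pyRange 1 n 1).map (fun dd => (dd,
          (PySem.List.pyRange 0 n 1).flatMap (fun i =>
            (if i - dd ≥ 0 then [(i, i - dd)] else [])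
              ++ (if i + dd < n then [(i, i + dd)] else [])))) := by
  unfold get_all_pairs_by_distance_alt
  have hfresh := PySem.Dict.items_foldl_insert_fresh
      (l := PySem.List.pyRange 1 n 1) (k := fun (a : Int) => a)
      (v := fun distance => (PySem.List.pyRange 0 n 1).foldl (fun bucket i =>
          let bucket := if i - distance ≥ 0 then bucket ++ [(i, i - distance)] else bucket
          if i + distance < n then bucket ++ [(i, i + distance)] else bucket) [])
      (d := (PySem.Dict.empty : PySem.Dict Int (List (Int × Int))))
      (fun a _ => by simp) (by simpa using PySem.List.nodup_pyRange_one 1 n)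
  refine hfresh.trans ?_
  rw [show (PySem.Dict.empty : PySem.Dict Int (List (Int × Int))).items = [] from rfl,
      List.nil_append]
  apply List.map_congr_left
  intro dd _
  congr 1
  beta_reduce
  have hfun : (fun (bucket : List (Int × Int)) (i : Int) =>
        let bucket := if i - dd ≥ 0 then bucket ++ [(i, i - dd)] else bucket
        if i + dd < n then bucket ++ [(i, i + dd)] else bucket)
      = fun b i => b ++ ((if i - dd ≥ 0 then [(i, i - dd)] else [])
          ++ (if i + dd < n then [(i, i + dd)] else [])) := by
    funext b i
    by_cases c1 : dd ≤ i <;> by_cases c2 : i + dd < n <;>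
      simp [c1, c2]
  rw [hfun, PySem.List.foldl_append_eq_flatMap, List.nil_append]

-- ===== VERDICT (by name: the statement is the Claim_ definition above) =====
theorem get_all_pairs_by_distance_spec : Claim_equal_get_all_pairs_by_distance := by
  intro n _hdom
  unfold Spec_get_all_pairs_by_distance
  rw [pvA_items, pvKeysList, pvB_eq]
  apply List.map_congr_left
  intro dd hdd
  rw [PySem.List.mem_pyRange_one] at hdd
  congr 1
  unfold pvF
  rw [List.filter_flatMap, List.map_flatMap]
  apply List.flatMap_congr
  intro i hi
  rw [PySem.List.mem_pyRange_one] at hi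
  rw [pvRowA n i dd (by omega) (by omega) (n - 0).toNat 0 rfl]
  congr 1
  · by_cases c : (0:Int) ≤ i - dd
    · rw [if_pos ⟨c, by omega⟩, if_pos (by omega)]
    · rw [if_neg (by omega), if_neg (by omega)]
  · by_cases c : i + dd < n
    · rw [if_pos ⟨by omega, c⟩, if_pos c]
    · rw [if_neg (by omega), if_neg c]
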